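-- pv_equiv track=rewrite | github.com/tonybnya/fcc-daily-coding-challenge | fcc_042_battle.py | word_value
-- ===== SOURCE A (Python) =====
-- WORDS: dict[str, int] = {
--     "a": 1,
--     "b": 2,
--     "c": 3,
--     "d": 4,
--     "e": 5,
--     "f": 6,
--     "g": 7,
--     "h": 8,
--     "i": 9,
--     "j": 10,
--     "k": 11,
--     "l": 12,
--     "m": 13,
--     "n": 14,
--     "o": 15,
--     "p": 16,
--     "q": 17,
--     "r": 18,
--     "s": 19,
--     "t": 20,
--     "u": 21,
--     "v": 22,
--     "w": 23,
--     "x": 24,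
--     "y": 25,
--     "z": 26,
-- }
--
-- def word_value(word: str) -> int:
--     """
--     Calculate the value of a word
--     """
--     value: int = 0
--     for c in word:
--         if 97 <= ord(c) <= 122:
--             value += WORDS[c]
--         else:
--             value += WORDS[c.lower()] * 2
--     return value
-- ===== SOURCE B (Python) =====
-- def word_value(word: str) -> int:
--     # histogram of the characters first, then one weighted pass over the distinct characters
--     counts: dict[str, int] = {}
--     for c in word:
--         counts[c] = counts.get(c, 0) + 1
--     total = 0
--     for c, n in counts.items():
--         o = ord(c)
--         total += n * (o - 96 if 97 <= o <= 122 else 2 * (o - 64))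
--     return total
-- ===== Notes on version B (the rewrite author's own statement) =====
-- stated objective: alternative
-- what changed: Replaces A's single per-character loop with dict lookups by a histogram algorithm: build a character-count dict in one pass, then compute the total in a second pass over the distinct characters, using char-code arithmetic (ord-96, doubled via 2*(ord-64) for uppercase) instead of the WORDS table.
import Mathlib
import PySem

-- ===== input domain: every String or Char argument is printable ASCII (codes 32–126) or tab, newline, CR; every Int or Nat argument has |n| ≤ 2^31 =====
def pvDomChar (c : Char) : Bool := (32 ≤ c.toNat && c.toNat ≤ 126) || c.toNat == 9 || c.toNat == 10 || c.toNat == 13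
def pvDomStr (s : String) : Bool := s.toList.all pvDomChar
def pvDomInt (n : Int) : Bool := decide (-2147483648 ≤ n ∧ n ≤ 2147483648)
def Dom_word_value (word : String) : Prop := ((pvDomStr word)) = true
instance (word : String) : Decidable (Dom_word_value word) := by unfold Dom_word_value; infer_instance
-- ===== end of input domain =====

-- B replaces A's single lookup loop by a histogram: count characters into a dict, then one weighted pass over the distinct characters with char-code arithmetic (objective: alternative).


-- ===== PORT A =====
def WORDS : PySem.Dict String Int := PySem.Dict.ofList
  [("a", 1), ("b", 2), ("c", 3), ("d", 4), ("e", 5), ("f", 6), ("g", 7), ("h", 8),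
   ("i", 9), ("j", 10), ("k", 11), ("l", 12), ("m", 13), ("n", 14), ("o", 15), ("p", 16),
   ("q", 17), ("r", 18), ("s", 19), ("t", 20), ("u", 21), ("v", 22), ("w", 23), ("x", 24),
   ("y", 25), ("z", 26)]

-- WORDS[c] raises KeyError on a missing key; Pre_word_value excludes exactly those inputs,
-- so the getD default 0 is never reached on admitted inputs.
def word_value (word : String) : Int :=
  word.toList.foldl
    (fun value c =>
      if 97 ≤ c.toNat ∧ c.toNat ≤ 122 then
        value + WORDS.getD (String.mk [c]) 0
      else
        value + WORDS.getD (PySem.Str.lower (String.mk [c])) 0 * 2)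
    0

-- ===== PORT B =====
def word_value_alt (word : String) : Int :=
  let counts : PySem.Dict Char Int :=
    word.toList.foldl (fun d c => d.insert c (d.getD c 0 + 1)) PySem.Dict.empty
  counts.items.foldl
    (fun total p =>
      total + p.2 * (if 97 ≤ p.1.toNat ∧ p.1.toNat ≤ 122 then (p.1.toNat : Int) - 96
                     else 2 * ((p.1.toNat : Int) - 64)))
    0

-- ===== PRECONDITION & SPEC =====
-- Pre_ excludes exactly the words containing a non-ASCII-letter character, on which A raises KeyError.
def Pre_word_value (word : String) : Prop :=
  word.toList.all
    (fun c => decide ((97 ≤ c.toNat ∧ c.toNat ≤ 122) ∨ (65 ≤ c.toNat ∧ c.toNat ≤ 90))) = true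
instance (word : String) : Decidable (Pre_word_value word) := by unfold Pre_word_value; infer_instance
def pvWitness_word_value : String := "AbZ"

def Spec_word_value (word : String) (out : Int) : Prop := out = word_value_alt word
instance (word : String) (out : Int) : Decidable (Spec_word_value word out) := by unfold Spec_word_value; infer_instance

-- ===== CLAIM (what is proved, stated in full; the proofs are below) =====
def Claim_equal_word_value : Prop := ∀ (word : String), Dom_word_value word → Pre_word_value word → Spec_word_value word (word_value word)

-- ===== LEMMAS AND PROOFS =====

-- B's per-character value (char-code arithmetic)
def pvValB (c : Char) : Int :=
  if 97 ≤ c.toNat ∧ c.toNat ≤ 122 then (c.toNat : Int) - 96 else 2 * ((c.toNat : Int) - 64)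

-- A's per-character value (WORDS lookups)
def pvValA (c : Char) : Int :=
  if 97 ≤ c.toNat ∧ c.toNat ≤ 122 then
    WORDS.getD (String.mk [c]) 0
  else
    WORDS.getD (PySem.Str.lower (String.mk [c])) 0 * 2

-- On every ASCII letter the WORDS lookup agrees with the char-code arithmetic
lemma pvVal_eq (c : Char)
    (h : (97 ≤ c.toNat ∧ c.toNat ≤ 122) ∨ (65 ≤ c.toNat ∧ c.toNat ≤ 90)) :
    pvValA c = pvValB c := by
  have hc : Char.ofNat c.toNat = c := Char.ofNat_toNat c
  set n := c.toNat with hn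
  obtain ⟨h1, h2⟩ | ⟨h1, h2⟩ := h <;>
    interval_cases n <;> (rw [← hc]; decide)

-- A's loop is the sum of per-character values
lemma pvA_eq (word : String) : word_value word = (word.toList.map pvValA).sum := by
  unfold word_value
  have h := PySem.List.foldl_congr_mem'
      (l := word.toList) (init := (0 : Int))
      (f := fun value c =>
        if 97 ≤ c.toNat ∧ c.toNat ≤ 122 then
          value + WORDS.getD (String.mk [c]) 0
        else
          value + WORDS.getD (PySem.Str.lower (String.mk [c])) 0 * 2)
      (g := fun value c => value + pvValA c)
      (fun c _ acc => by dsimp only; unfold pvValA; split_ifs <;> rfl)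
  rw [h, PySem.List.foldl_add]
  ring

-- B's body is the weighted sum over the distinct characters
lemma pvAlt_eq (word : String) :
    word_value_alt word
      = ((PySem.Set.ofList word.toList).map
          (fun k => (word.toList.count k : Int) * pvValB k)).sum := by
  have h : word_value_alt word
      = ((PySem.Dict.counter word.toList).items).foldl
          (fun total p =>
            total + p.2 * (if 97 ≤ p.1.toNat ∧ p.1.toNat ≤ 122 then (p.1.toNat : Int) - 96
                           else 2 * ((p.1.toNat : Int) - 64))) 0 := rfl
  rw [h, PySem.Dict.items_counter,
    PySem.List.foldl_add
      (g := fun p : Char × Int =>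
        p.2 * (if 97 ≤ p.1.toNat ∧ p.1.toNat ≤ 122 then (p.1.toNat : Int) - 96
               else 2 * ((p.1.toNat : Int) - 64))),
    List.map_map]
  rw [zero_add]
  apply congrArg List.sum
  apply List.map_congr_left
  intro k _
  simp only [Function.comp, pvValB]

-- a 0/else-f(c) sum over a Nodup list containing c is f c
lemma pvSum_single (f : Char → Int) :
    ∀ (S : List Char), S.Nodup → ∀ c ∈ S,
      (S.map (fun k => if k = c then f k else 0)).sum = f c := by
  intro S
  induction S with
  | nil => intro _ c hc; cases hc
  | cons a t ih =>
      intro hnd c hc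
      rcases List.nodup_cons.mp hnd with ⟨ha, hndt⟩
      rcases List.mem_cons.mp hc with rfl | hct
      · have hz : (t.map (fun k => if k = c then f k else 0)).sum = 0 := by
          apply List.sum_eq_zero
          intro x hx
          rcases List.mem_map.mp hx with ⟨k, hk, rfl⟩
          have : k ≠ c := fun h => ha (h ▸ hk)
          simp [this]
        simp [hz]
      · have hac : a ≠ c := fun h => ha (h ▸ hct)
        simp [hac, ih hndt c hct]

-- histogram sum = plain sum: Σ_{k ∈ set(cs)} count(k) * f(k) = Σ_{c ∈ cs} f(c)
lemma pvHistogram (f : Char → Int) :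
    ∀ (cs : List Char),
      ((PySem.Set.ofList cs).map (fun k => (cs.count k : Int) * f k)).sum
        = (cs.map f).sum := by
  intro cs
  induction cs using List.reverseRecOn with
  | nil => simp [PySem.Set.ofList_nil]
  | append_singleton l c ih =>
      rw [PySem.Set.ofList_append_singleton]
      by_cases hm : c ∈ PySem.Set.ofList l
      · have hcl : c ∈ l := (PySem.Set.mem_ofList l c).mp hm
        rw [PySem.Set.add_of_mem hm]
        have hsplit :
            ((PySem.Set.ofList l).map (fun k => ((l ++ [c]).count k : Int) * f k)).sum
              = ((PySem.Set.ofList l).map (fun k => (l.count k : Int) * f k)).sum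
                + ((PySem.Set.ofList l).map (fun k => if k = c then f k else 0)).sum := by
          rw [← PySem.List.sum_map_add_int]
          apply congrArg List.sum
          apply List.map_congr_left
          intro k _
          by_cases hk : k = c
          · subst hk
            simp [List.count_append]
            ring
          · simp [List.count_append, List.count_eq_zero, hk]
        rw [hsplit, ih, pvSum_single f _ (PySem.Set.nodup_ofList l) c hm]
        simp [List.map_append]
      · have hcl : c ∉ l := fun h => hm ((PySem.Set.mem_ofList l c).mpr h)
        rw [PySem.Set.add_of_not_mem hm, List.map_append, List.sum_append]
        have h1 :
            ((PySem.Set.ofList l).map (fun k => ((l ++ [c]).count k : Int) * f k))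
              = ((PySem.Set.ofList l).map (fun k => (l.count k : Int) * f k)) :=
          List.map_congr_left (fun k hk => by
            have hkc : k ≠ c := fun h => hcl (h ▸ (PySem.Set.mem_ofList l k).mp hk)
            simp [List.count_append, List.count_eq_zero, hkc])
        rw [h1, ih]
        have h2 : ((l ++ [c]).count c : Int) = 1 := by
          simp [List.count_append, List.count_eq_zero_of_not_mem hcl]
        simp [List.map_append, List.count_eq_zero_of_not_mem hcl]

-- ===== VERDICT (by name: the statement is the Claim_ definition above) =====
theorem word_value_spec : Claim_equal_word_value := by
  intro word _ hpre
  have hpre' : ∀ c ∈ word.toList,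
      (97 ≤ c.toNat ∧ c.toNat ≤ 122) ∨ (65 ≤ c.toNat ∧ c.toNat ≤ 90) := by
    intro c hc
    simpa using List.all_eq_true.mp hpre c hc
  unfold Spec_word_value
  rw [pvA_eq, pvAlt_eq, pvHistogram pvValB word.toList]
  exact congrArg List.sum (List.map_congr_left (fun c hc => pvVal_eq c (hpre' c hc)))
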